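-- pv_equiv track=rewrite | github.com/toroleapinc/encephagen | experiments/25_scfc_validation.py | find_homotopic_pairs
-- ===== SOURCE A (Python) =====
-- def find_homotopic_pairs(labels):
--     """Find left-right homotopic region pairs."""
--     pairs = []
--     for i, li in enumerate(labels):
--         for j, lj in enumerate(labels):
--             if i >= j:
--                 continue
--             # Check if one is left and other is right of same region
--             li_clean = li.replace(' lh', '').replace(' rh', '').replace('_left', '').replace('_right', '')
--             lj_clean = lj.replace(' lh', '').replace(' rh', '').replace('_left', '').replace('_right', '')
--             if li_clean == lj_clean and li != lj:
--                 pairs.append((i, j))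
--     return pairs
-- ===== SOURCE B (Python) =====
-- def find_homotopic_pairs(labels):
--     """Find left-right homotopic region pairs."""
--     def clean(s):
--         return s.replace(' lh', '').replace(' rh', '').replace('_left', '').replace('_right', '')
--     groups = {}
--     for j, lab in enumerate(labels):
--         groups.setdefault(clean(lab), []).append((j, lab))
--     pairs = []
--     for i, li in enumerate(labels):
--         for j, lj in groups.get(clean(li), []):
--             if i < j and li != lj:
--                 pairs.append((i, j))
--     return pairs
-- ===== Notes on version B (the rewrite author's own statement) =====
-- stated objective: faster
-- what changed: Instead of scanning all ordered pairs and re-cleaning both labels for every pair, B cleans each label once while grouping indices in a dict keyed by the cleaned label, then emits each index's later same-group partners, which preserves A's (i,j)-lexicographic output order.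
import Mathlib
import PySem

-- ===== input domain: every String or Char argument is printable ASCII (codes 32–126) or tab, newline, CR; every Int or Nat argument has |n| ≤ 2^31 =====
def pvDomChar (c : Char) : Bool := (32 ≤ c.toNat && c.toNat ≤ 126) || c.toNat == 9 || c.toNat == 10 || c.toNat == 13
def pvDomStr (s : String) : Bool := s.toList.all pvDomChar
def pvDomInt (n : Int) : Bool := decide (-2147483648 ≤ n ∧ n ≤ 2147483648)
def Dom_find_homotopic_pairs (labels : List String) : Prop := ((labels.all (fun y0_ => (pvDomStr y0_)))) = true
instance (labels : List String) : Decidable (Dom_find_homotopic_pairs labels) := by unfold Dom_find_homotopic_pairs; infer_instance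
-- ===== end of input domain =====

-- B replaces A's all-pairs scan (which re-cleans both labels for every ordered pair) by a
-- single cleaning/grouping pass over a dict keyed on the cleaned label, emitting each
-- index's partners from its own group; objective: faster.

-- ===== PORT A =====
def find_homotopic_pairs (labels : List String) : List (Int × Int) :=
  (PySem.List.enumerate labels).foldl (fun pairs p =>
    (PySem.List.enumerate labels).foldl (fun pairs q =>
      if p.1 ≥ q.1 then pairs
      else
        let li_clean := PySem.Str.replace (PySem.Str.replace (PySem.Str.replace (PySem.Str.replace p.2 " lh" "") " rh" "") "_left" "") "_right" ""
        let lj_clean := PySem.Str.replace (PySem.Str.replace (PySem.Str.replace (PySem.Str.replace q.2 " lh" "") " rh" "") "_left" "") "_right" ""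
        if li_clean = lj_clean ∧ p.2 ≠ q.2 then pairs ++ [(p.1, q.1)] else pairs)
      pairs) []

-- ===== PORT B =====
-- helper `clean` of Source B
def pvClean (s : String) : String :=
  PySem.Str.replace (PySem.Str.replace (PySem.Str.replace (PySem.Str.replace s " lh" "") " rh" "") "_left" "") "_right" ""

def find_homotopic_pairs_alt (labels : List String) : List (Int × Int) :=
  let groups : PySem.Dict String (List (Int × String)) :=
    (PySem.List.enumerate labels).foldl
      (fun d p => d.modify (pvClean p.2) [] (· ++ [p])) PySem.Dict.empty
  (PySem.List.enumerate labels).foldl (fun pairs p =>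
    (groups.getD (pvClean p.2) []).foldl (fun pairs q =>
      if p.1 < q.1 ∧ p.2 ≠ q.2 then pairs ++ [(p.1, q.1)] else pairs)
      pairs) []

-- ===== PRECONDITION & SPEC =====
def Spec_find_homotopic_pairs (labels : List String) (out : List (Int × Int)) : Prop := out = find_homotopic_pairs_alt labels
instance (labels : List String) (out : List (Int × Int)) : Decidable (Spec_find_homotopic_pairs labels out) := by unfold Spec_find_homotopic_pairs; infer_instance

-- ===== CLAIM (what is proved, stated in full; the proofs are below) =====
def Claim_equal_find_homotopic_pairs : Prop := ∀ (labels : List String), Dom_find_homotopic_pairs labels → Spec_find_homotopic_pairs labels (find_homotopic_pairs labels)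

-- ===== LEMMAS AND PROOFS =====

-- the dict built by B's first loop, looked up at key c, holds exactly the enumerated
-- entries whose cleaned label is c, in order
theorem pv_groups_getD (labels : List String) (c : String) :
    (((PySem.List.enumerate labels).foldl
        (fun d p => d.modify (pvClean p.2) [] (· ++ [p])) PySem.Dict.empty).getD c [])
      = (PySem.List.enumerate labels).filter (fun q => pvClean q.2 == c) := by
  rw [show ((PySem.List.enumerate labels).foldl
        (fun d p => d.modify (pvClean p.2) [] (· ++ [p])) PySem.Dict.empty)
      = (((PySem.List.enumerate labels).map (fun p => (pvClean p.2, p))).foldl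
        (fun d q => d.modify q.1 [] (· ++ [q.2])) PySem.Dict.empty) from (List.foldl_map (f := fun p => (pvClean p.2, p)) (g := fun d q => d.modify q.1 [] (· ++ [q.2])) (l := PySem.List.enumerate labels) (init := PySem.Dict.empty)).symm,
    PySem.Dict.getD_foldl_modify_append, List.filter_map, List.map_map]
  simp [Function.comp_def, PySem.Dict.empty, PySem.Dict.getD, PySem.Dict.get?]

-- both inner loops append, to any accumulator, the same filtered pair list
theorem pv_inner (labels : List String) (p : Int × String) (acc : List (Int × Int)) :
    ((PySem.List.enumerate labels).foldl (fun pairs q =>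
        if p.1 ≥ q.1 then pairs
        else
          let li_clean := PySem.Str.replace (PySem.Str.replace (PySem.Str.replace (PySem.Str.replace p.2 " lh" "") " rh" "") "_left" "") "_right" ""
          let lj_clean := PySem.Str.replace (PySem.Str.replace (PySem.Str.replace (PySem.Str.replace q.2 " lh" "") " rh" "") "_left" "") "_right" ""
          if li_clean = lj_clean ∧ p.2 ≠ q.2 then pairs ++ [(p.1, q.1)] else pairs) acc)
      = (((PySem.List.enumerate labels).filter (fun q => pvClean q.2 == pvClean p.2)).foldl
          (fun pairs q => if p.1 < q.1 ∧ p.2 ≠ q.2 then pairs ++ [(p.1, q.1)] else pairs) acc) := by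
  have hA : ((PySem.List.enumerate labels).foldl (fun pairs q =>
        if p.1 ≥ q.1 then pairs
        else
          let li_clean := PySem.Str.replace (PySem.Str.replace (PySem.Str.replace (PySem.Str.replace p.2 " lh" "") " rh" "") "_left" "") "_right" ""
          let lj_clean := PySem.Str.replace (PySem.Str.replace (PySem.Str.replace (PySem.Str.replace q.2 " lh" "") " rh" "") "_left" "") "_right" ""
          if li_clean = lj_clean ∧ p.2 ≠ q.2 then pairs ++ [(p.1, q.1)] else pairs) acc)
      = acc ++ ((PySem.List.enumerate labels).filter
          (fun q => decide (p.1 < q.1) && (pvClean p.2 == pvClean q.2) && !(p.2 == q.2))).map (fun q => (p.1, q.1)) := by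
    rw [PySem.List.foldl_congr_mem _ _
          (fun pairs q => if (decide (p.1 < q.1) && (pvClean p.2 == pvClean q.2) && !(p.2 == q.2)) then pairs ++ [(p.1, q.1)] else pairs) _
          ?_]
    · exact PySem.List.foldl_append_if _ _ _ _
    · intro pairs q _
      show (if p.1 ≥ q.1 then pairs
            else if pvClean p.2 = pvClean q.2 ∧ p.2 ≠ q.2 then pairs ++ [(p.1, q.1)] else pairs) = _
      by_cases h1 : p.1 < q.1 <;> by_cases h2 : pvClean p.2 = pvClean q.2 <;> by_cases h3 : p.2 = q.2 <;>
        simp [h1, h2, h3, show ¬(p.1 ≥ q.1) ↔ p.1 < q.1 from not_le]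
  have hB : (((PySem.List.enumerate labels).filter (fun q => pvClean q.2 == pvClean p.2)).foldl
        (fun pairs q => if p.1 < q.1 ∧ p.2 ≠ q.2 then pairs ++ [(p.1, q.1)] else pairs) acc)
      = acc ++ (((PySem.List.enumerate labels).filter (fun q => pvClean q.2 == pvClean p.2)).filter
          (fun q => decide (p.1 < q.1) && !(p.2 == q.2))).map (fun q => (p.1, q.1)) := by
    rw [PySem.List.foldl_congr_mem _ _
          (fun pairs q => if (decide (p.1 < q.1) && !(p.2 == q.2)) then pairs ++ [(p.1, q.1)] else pairs) _
          ?_]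
    · exact PySem.List.foldl_append_if _ _ _ _
    · intro pairs q _
      by_cases h1 : p.1 < q.1 <;> by_cases h3 : p.2 = q.2 <;> simp [h1, h3]
  have hf : List.filter (fun q => decide (p.1 < q.1) && (pvClean p.2 == pvClean q.2) && !(p.2 == q.2)) (PySem.List.enumerate labels)
      = List.filter (fun q => (decide (p.1 < q.1) && !(p.2 == q.2)) && (pvClean q.2 == pvClean p.2)) (PySem.List.enumerate labels) := by
    apply List.filter_congr
    intro q _
    simp [Bool.and_comm, Bool.and_left_comm, BEq.comm]
  rw [hA, hB, List.filter_filter, hf]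

-- ===== VERDICT (by name: the statement is the Claim_ definition above) =====
theorem find_homotopic_pairs_spec : Claim_equal_find_homotopic_pairs := by
  intro labels _
  unfold Spec_find_homotopic_pairs find_homotopic_pairs find_homotopic_pairs_alt
  simp only [pv_groups_getD]
  exact PySem.List.foldl_congr_mem _ _ _ _ (fun acc p _ => pv_inner labels p acc)
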